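-- pv_equiv track=rewrite | github.com/webis-de/ECIR-19 | text_reuse_pipline/preprocess/web.py | remove_footers
-- ===== SOURCE A (Python) =====
-- def remove_footers(paragraphs, stopwords, puncs, min_tokens, min_stopwords):
--     idx    = len(paragraphs) -1
--     main_content = False
--
--     def contains_punct(s, puncs):
--         for p in puncs:
--             if p in s:
--                 return True
--
--     while not main_content and idx > 0:
--         p = paragraphs[idx]
--         p_tokens = [x.lower() for x in p.split()]
--
--         if len(p_tokens) > min_tokens and len(stopwords.intersection(set(p_tokens))) > min_stopwords and contains_punct(p, puncs):
--             main_content = True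
--             break
--
--         idx-=1
--
--     return paragraphs[0:idx]
-- ===== SOURCE B (Python) =====
-- def remove_footers(paragraphs, stopwords, puncs, min_tokens, min_stopwords):
--     def is_main(p):
--         tokens = [t.lower() for t in p.split()]
--         return (len(tokens) > min_tokens
--                 and len(stopwords.intersection(tokens)) > min_stopwords
--                 and any(q in p for q in puncs))
--     hits = [i for i, p in enumerate(paragraphs) if i > 0 and is_main(p)]
--     best = max(hits) if hits else 0
--     return paragraphs[:best]
-- ===== Notes on version B (the rewrite author's own statement) =====
-- stated objective: alternative
-- what changed: A's backward while-loop that breaks at the first (highest) main-content paragraph is replaced by an is_main predicate helper plus a forward index-collection: list all matching indices via enumerate, take their max (default 0), and slice the prefix.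
import Mathlib
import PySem

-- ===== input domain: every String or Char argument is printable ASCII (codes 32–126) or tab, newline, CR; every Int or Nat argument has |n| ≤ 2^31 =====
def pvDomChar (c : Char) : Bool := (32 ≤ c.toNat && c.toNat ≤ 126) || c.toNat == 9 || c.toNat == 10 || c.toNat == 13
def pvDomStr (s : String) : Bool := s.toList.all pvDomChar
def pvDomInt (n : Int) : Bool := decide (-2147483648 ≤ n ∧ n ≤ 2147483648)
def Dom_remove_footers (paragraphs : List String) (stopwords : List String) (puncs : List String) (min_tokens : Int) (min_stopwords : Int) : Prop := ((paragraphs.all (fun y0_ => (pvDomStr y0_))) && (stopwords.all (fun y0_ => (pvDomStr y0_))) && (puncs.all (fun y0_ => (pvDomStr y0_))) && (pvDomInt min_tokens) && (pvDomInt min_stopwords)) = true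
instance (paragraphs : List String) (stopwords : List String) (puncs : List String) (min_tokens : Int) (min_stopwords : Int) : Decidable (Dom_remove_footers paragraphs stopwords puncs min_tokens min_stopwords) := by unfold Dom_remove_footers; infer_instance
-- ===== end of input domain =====

-- B replaces A's backward break-on-first-hit while-loop by a forward index-collection
-- (filter matching indices, take their max, default 0) — objective: alternative decomposition, same cost.

-- ===== PORT A =====

-- A's inner helper contains_punct (returns True / falsy None → Bool)
def pvContainsPunct (s : String) (puncs : List String) : Bool :=
  puncs.any (fun q => PySem.Str.isIn q s)

-- A's while-loop: idx counts down from len-1 while > 0; stops (returns idx) on the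
-- first (= highest) footer-breaking paragraph, else reaches 0
def pvFooterScan (paragraphs : List String) (stopwords : List String) (puncs : List String) (min_tokens : Int) (min_stopwords : Int) : Nat → Nat
  | 0 => 0
  | idx+1 =>
    -- paragraphs[idx] with idx in range (1 ≤ idx ≤ len-1 whenever the loop runs)
    let p := PySem.List.pyGetD paragraphs ((idx : Int)+1) ""
    let p_tokens := (PySem.Str.split₀ p).map PySem.Str.lower
    if decide ((p_tokens.length : Int) > min_tokens)
        && decide (((PySem.Set.inter stopwords (PySem.Set.ofList p_tokens)).length : Int) > min_stopwords)
        && pvContainsPunct p puncs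
    then idx+1
    else pvFooterScan paragraphs stopwords puncs min_tokens min_stopwords idx

def remove_footers (paragraphs : List String) (stopwords : List String) (puncs : List String) (min_tokens : Int) (min_stopwords : Int) : List String :=
  -- idx = len-1; the while loop runs only when idx > 0 (so only for len ≥ 1; for len = 0 idx stays -1)
  let idx : Int :=
    if paragraphs.length = 0 then (paragraphs.length : Int) - 1
    else (pvFooterScan paragraphs stopwords puncs min_tokens min_stopwords (paragraphs.length - 1) : Int)
  PySem.List.slice paragraphs (some 0) (some idx)

-- ===== PORT B =====

-- Source B's is_main(p)
def pvIsMain (stopwords : List String) (puncs : List String) (min_tokens : Int) (min_stopwords : Int) (p : String) : Bool :=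
  let tokens := (PySem.Str.split₀ p).map PySem.Str.lower
  decide ((tokens.length : Int) > min_tokens)
  && decide (((PySem.Set.inter stopwords tokens).length : Int) > min_stopwords)
  && puncs.any (fun q => PySem.Str.isIn q p)

def remove_footers_alt (paragraphs : List String) (stopwords : List String) (puncs : List String) (min_tokens : Int) (min_stopwords : Int) : List String :=
  let hits := ((PySem.List.enumerate paragraphs 0).filter
      (fun ip => decide (0 < ip.1) && pvIsMain stopwords puncs min_tokens min_stopwords ip.2)).map (fun ip => ip.1)
  let best : Int := (PySem.List.max? hits (fun i => i)).getD 0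
  PySem.List.slice paragraphs none (some best)

-- ===== PRECONDITION & SPEC =====
def Spec_remove_footers (paragraphs : List String) (stopwords : List String) (puncs : List String) (min_tokens : Int) (min_stopwords : Int) (out : List String) : Prop := out = remove_footers_alt paragraphs stopwords puncs min_tokens min_stopwords
instance (paragraphs : List String) (stopwords : List String) (puncs : List String) (min_tokens : Int) (min_stopwords : Int) (out : List String) : Decidable (Spec_remove_footers paragraphs stopwords puncs min_tokens min_stopwords out) := by unfold Spec_remove_footers; infer_instance

-- ===== CLAIM (what is proved, stated in full; the proofs are below) =====
def Claim_equal_remove_footers : Prop := ∀ (paragraphs : List String) (stopwords : List String) (puncs : List String) (min_tokens : Int) (min_stopwords : Int), Dom_remove_footers paragraphs stopwords puncs min_tokens min_stopwords → Spec_remove_footers paragraphs stopwords puncs min_tokens min_stopwords (remove_footers paragraphs stopwords puncs min_tokens min_stopwords)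

-- ===== LEMMAS AND PROOFS =====

theorem pvCond_eq (stopwords puncs : List String) (min_tokens min_stopwords : Int) (p : String) :
    (decide (((((PySem.Str.split₀ p).map PySem.Str.lower).length : Int)) > min_tokens)
      && decide (((PySem.Set.inter stopwords (PySem.Set.ofList ((PySem.Str.split₀ p).map PySem.Str.lower))).length : Int) > min_stopwords)
      && pvContainsPunct p puncs)
    = pvIsMain stopwords puncs min_tokens min_stopwords p := by
  simp [pvIsMain, pvContainsPunct, PySem.Set.inter]

theorem pvScan_eq_max (paragraphs stopwords puncs : List String) (min_tokens min_stopwords : Int) (k : Nat) :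
    ((PySem.List.max? ((PySem.List.pyRange 0 ((k : Int)+1) 1).filter
        (fun j => decide (0 < j) && pvIsMain stopwords puncs min_tokens min_stopwords (PySem.List.pyGetD paragraphs j "")))
      (fun i => i)).getD 0)
    = ((pvFooterScan paragraphs stopwords puncs min_tokens min_stopwords k : Nat) : Int) := by
  induction k with
  | zero =>
      have h01 : PySem.List.pyRange 0 1 1 = [(0:Int)] := by decide
      rw [show ((0:Nat):Int) + 1 = 1 by norm_num, h01]
      simp [PySem.List.max?]
  | succ k ih =>
      have hsplit : PySem.List.pyRange 0 (((k+1:Nat) : Int)+1) 1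
          = PySem.List.pyRange 0 ((k:Int)+1) 1 ++ PySem.List.pyRange ((k:Int)+1) (((k+1:Nat):Int)+1) 1 := by
        apply PySem.List.pyRange_one_append <;> push_cast <;> omega
      have hsing : PySem.List.pyRange ((k:Int)+1) (((k+1:Nat):Int)+1) 1 = [(k:Int)+1] := by
        rw [PySem.List.pyRange_one_cons]
        · norm_num
        · push_cast; omega
      rw [hsplit, List.filter_append, hsing]
      simp only [pvFooterScan]
      rw [pvCond_eq]
      have hd : decide (0 < (k:Int)+1) = true := by simp
      cases hq : pvIsMain stopwords puncs min_tokens min_stopwords (PySem.List.pyGetD paragraphs ((k:Int)+1) "") with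
      | false =>
          simp only [List.filter_cons, List.filter_nil, hq, hd, Bool.and_false]
          simpa using ih
      | true =>
          have hL : ∀ x ∈ (PySem.List.pyRange 0 ((k:Int)+1) 1).filter
              (fun j => decide (0 < j) && pvIsMain stopwords puncs min_tokens min_stopwords (PySem.List.pyGetD paragraphs j "")),
              x < (k:Int)+1 := by
            intro x hx
            have := (List.mem_filter.mp hx).1
            have := (PySem.List.mem_pyRange_one.mp this)
            omega
          simp only [List.filter_cons, hq, hd, Bool.true_and, List.filter_nil, if_pos]
          set L := (PySem.List.pyRange 0 ((k:Int)+1) 1).filter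
              (fun j => decide (0 < j) && pvIsMain stopwords puncs min_tokens min_stopwords (PySem.List.pyGetD paragraphs j "")) with hLdef
          have hne : L ++ [(k:Int)+1] ≠ [] := by simp
          cases hm : PySem.List.max? (L ++ [(k:Int)+1]) (fun i => i) with
          | none => exact absurd ((PySem.List.max?_eq_none_iff _ _).mp hm) hne
          | some m =>
              have hmem : m ∈ L ++ [(k:Int)+1] := PySem.List.max?_mem hm
              have hmax : ((k:Int)+1) ≤ m := PySem.List.max?_isMax hm _ (by simp)
              have hm' : m = (k:Int)+1 := by
                rcases List.mem_append.mp hmem with h | h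
                · exact absurd (hL m h) (by omega)
                · simpa using h
              rw [hm']
              simp

-- ===== VERDICT (by name: the statement is the Claim_ definition above) =====
theorem remove_footers_spec : Claim_equal_remove_footers := by
  intro paragraphs stopwords puncs min_tokens min_stopwords _
  unfold Spec_remove_footers remove_footers remove_footers_alt
  cases paragraphs with
  | nil => rfl
  | cons h t =>
      simp only [List.length_cons, Nat.add_eq_zero_iff, Nat.add_sub_cancel]
      rw [PySem.List.enumerate_eq_map_pyRange (d := "")]
      rw [List.filter_map, List.map_map]
      simp only [Function.comp_def]
      have hlen : PySem.List.len (h :: t) = ((t.length : Nat) : Int) + 1 := by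
        simp
      rw [hlen, List.map_id', pvScan_eq_max]
      simp [PySem.List.slice_to_natCast]
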